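-- pv_equiv track=rewrite | github.com/StormInside/Cryptography_VGTU | Task 1-3.py | ascii_to_text
-- ===== SOURCE A (Python) =====
-- def ascii_to_text(numbers: list):
--     res = ""
--     for i in numbers:
--         if i <=127 and i >=0:
--             res = res + chr(i)
--         else:
--             raise KeyError("Number must be from 0 to 127")
--     return res
-- ===== SOURCE B (Python) =====
-- def ascii_to_text(numbers: list):
--     if any(i > 127 or i < 0 for i in numbers):
--         raise KeyError("Number must be from 0 to 127")
--     return ''.join(chr(i) for i in numbers)
-- ===== Notes on version B (the rewrite author's own statement) =====
-- stated objective: idiomatic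
-- what changed: Replaced the single interleaved validate-and-concatenate loop (quadratic string concatenation) with a separate validation pass followed by a ''.join over a generator.
import Mathlib
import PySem

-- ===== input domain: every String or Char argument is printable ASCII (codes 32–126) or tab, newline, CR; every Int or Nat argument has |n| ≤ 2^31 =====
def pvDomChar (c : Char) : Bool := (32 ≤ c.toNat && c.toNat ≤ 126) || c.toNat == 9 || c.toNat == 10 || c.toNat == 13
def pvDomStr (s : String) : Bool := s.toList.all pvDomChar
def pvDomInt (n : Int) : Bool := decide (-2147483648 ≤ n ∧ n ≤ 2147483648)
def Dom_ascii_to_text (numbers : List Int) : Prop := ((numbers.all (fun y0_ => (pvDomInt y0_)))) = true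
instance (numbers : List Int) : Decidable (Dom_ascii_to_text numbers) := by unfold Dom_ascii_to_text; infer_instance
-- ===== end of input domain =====

-- B replaces A's interleaved validate-and-concatenate loop by a validation pass then a single join (idiomatic decomposition).


-- ===== PORT A =====
-- A's loop: res accumulates chr(i) for each i; 'raise' exits the loop (those inputs are outside Pre_).
def ascii_to_text_loop (res : List Char) : List Int → List Char
  | [] => res
  | i :: t => if i ≤ 127 && 0 ≤ i then ascii_to_text_loop (res ++ [Char.ofNat i.toNat]) t else res

def ascii_to_text (numbers : List Int) : String := String.ofList (ascii_to_text_loop [] numbers)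

-- ===== PORT B =====
-- validation pass (the 'raise' branch, outside Pre_), then one join over a map
def ascii_to_text_alt (numbers : List Int) : String :=
  if numbers.any (fun i => 127 < i || i < 0) then ""
  else String.ofList (numbers.map (fun i => Char.ofNat i.toNat))

-- ===== PRECONDITION & SPEC =====
-- Pre_ excludes exactly the inputs on which A raises KeyError (some element outside 0..127).
def Pre_ascii_to_text (numbers : List Int) : Prop :=
  numbers.all (fun i => 0 ≤ i && i ≤ 127) = true
instance (numbers : List Int) : Decidable (Pre_ascii_to_text numbers) := by
  unfold Pre_ascii_to_text; infer_instance

def pvWitness_ascii_to_text : List Int := [72, 105, 33]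

def Spec_ascii_to_text (numbers : List Int) (out : String) : Prop := out = ascii_to_text_alt numbers
instance (numbers : List Int) (out : String) : Decidable (Spec_ascii_to_text numbers out) := by
  unfold Spec_ascii_to_text; infer_instance

-- ===== CLAIM (what is proved, stated in full; the proofs are below) =====
def Claim_equal_ascii_to_text : Prop := ∀ (numbers : List Int), Dom_ascii_to_text numbers → Pre_ascii_to_text numbers → Spec_ascii_to_text numbers (ascii_to_text numbers)

-- ===== LEMMAS AND PROOFS =====
theorem ascii_loop_valid (numbers : List Int) (res : List Char)
    (h : ∀ i ∈ numbers, 0 ≤ i ∧ i ≤ 127) :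
    ascii_to_text_loop res numbers = res ++ numbers.map (fun i => Char.ofNat i.toNat) := by
  induction numbers generalizing res with
  | nil => simp [ascii_to_text_loop]
  | cons x t ih =>
    have hx := h x (by simp)
    have ht : ∀ i ∈ t, 0 ≤ i ∧ i ≤ 127 := fun i hi => h i (by simp [hi])
    simp [ascii_to_text_loop, hx.1, hx.2, ih _ ht]

-- ===== VERDICT (by name: the statement is the Claim_ definition above) =====
theorem ascii_to_text_spec : Claim_equal_ascii_to_text := by
  intro numbers _ hpre
  unfold Spec_ascii_to_text ascii_to_text ascii_to_text_alt
  have hall : ∀ i ∈ numbers, 0 ≤ i ∧ i ≤ 127 := by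
    intro i hi
    have := List.all_eq_true.mp hpre i hi
    simpa using this
  have hno : numbers.any (fun i => 127 < i || i < 0) = false := by
    simp only [List.any_eq_false]
    intro i hi
    have := hall i hi
    simp only [Bool.or_eq_true, decide_eq_true_eq, not_or, not_lt]
    exact ⟨this.2, this.1⟩
  rw [hno, ascii_loop_valid numbers [] hall]
  simp
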